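-- pv_equiv track=rewrite | github.com/alexomics/adventofcode | 2018/day05.py | collapse_polymer
-- ===== SOURCE A (Python) =====
-- from collections import deque
--
-- def collapse_polymer(s):
--     s = deque(s)
--     rebuild = []
--     while s:
--         u = s.pop()
--         if rebuild and (u.lower() == rebuild[-1].lower() and u != rebuild[-1]):
--             rebuild.pop()
--         else:
--             rebuild.append(u)
--     return len(rebuild)
-- ===== SOURCE B (Python) =====
-- def collapse_polymer(s):
--     cur = list(s)
--     while True:
--         nxt = []
--         i = 0
--         n = len(cur)
--         while i < n:
--             if i + 1 < n and cur[i].lower() == cur[i + 1].lower() and cur[i] != cur[i + 1]: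
--                 i += 2
--             else:
--                 nxt.append(cur[i])
--                 i += 1
--         if len(nxt) == n:
--             return n
--         cur = nxt
-- ===== Notes on version B (the rewrite author's own statement) =====
-- stated objective: alternative
-- what changed: Replaces A's single right-to-left stack pass with repeated left-to-right scans that delete all non-overlapping reacting adjacent pairs, iterated to a fixpoint (confluence of the reaction makes the reduced length identical).
import Mathlib
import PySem

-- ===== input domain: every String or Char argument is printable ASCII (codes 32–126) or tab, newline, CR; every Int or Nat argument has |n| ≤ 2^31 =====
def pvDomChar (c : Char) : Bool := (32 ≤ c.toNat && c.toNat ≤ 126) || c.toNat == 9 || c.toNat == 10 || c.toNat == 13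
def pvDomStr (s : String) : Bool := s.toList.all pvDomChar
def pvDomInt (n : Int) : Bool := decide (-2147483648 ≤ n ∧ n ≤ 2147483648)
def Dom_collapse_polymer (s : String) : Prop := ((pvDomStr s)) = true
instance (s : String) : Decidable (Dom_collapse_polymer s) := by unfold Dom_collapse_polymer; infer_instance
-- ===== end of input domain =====

-- B replaces A's single right-to-left stack pass by repeated left-to-right pair-deleting scans
-- iterated to a fixpoint (alternative decomposition, not faster). Neither mutates its argument.

-- a pair reacts: same letter, opposite case (Python: u.lower() == v.lower() and u != v)
def react (x y : Char) : Bool :=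
  (PySem.Chars.lowerChar x == PySem.Chars.lowerChar y) && (x != y)

-- ===== PORT A =====
-- A pops characters from the RIGHT end of the deque, maintaining the `rebuild` stack
-- (head of the Lean list = Python rebuild[-1]); the while-loop is a fold over the reversed list.
def redStep (rebuild : List Char) (u : Char) : List Char :=
  match rebuild with
  | h :: t => if react u h then t else u :: rebuild
  | [] => [u]

def collapse_polymer (s : String) : Int :=
  ((s.toList.reverse).foldl redStep []).length

-- ===== PORT B =====
-- one left-to-right scan of B's inner while-loop: delete non-overlapping reacting adjacent pairs
def pass1 : List Char → List Char
  | [] => []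
  | [x] => [x]
  | x :: y :: r => if react x y then pass1 r else x :: pass1 (y :: r)

-- needed by iterFix's termination argument, hence above the port
theorem pass1_length_le (l : List Char) : (pass1 l).length ≤ l.length := by
  induction l using pass1.induct with
  | case1 => simp [pass1]
  | case2 x => simp [pass1]
  | case3 x y r h ih => simp [pass1, h]; omega
  | case4 x y r h ih =>
      simp only [pass1, h] at ih ⊢
      simp at ih ⊢
      omega

-- B's outer while-True loop: iterate the scan until a pass removes nothing
def iterFix (l : List Char) : List Char :=
  if (pass1 l).length = l.length then l
  else iterFix (pass1 l)
termination_by l.length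
decreasing_by
  have h := pass1_length_le l
  omega

def collapse_polymer_alt (s : String) : Int :=
  (iterFix s.toList).length

-- ===== PRECONDITION & SPEC =====
def Spec_collapse_polymer (s : String) (out : Int) : Prop := out = collapse_polymer_alt s
instance (s : String) (out : Int) : Decidable (Spec_collapse_polymer s out) := by unfold Spec_collapse_polymer; infer_instance

-- ===== CLAIM (what is proved, stated in full; the proofs are below) =====
def Claim_equal_collapse_polymer : Prop := ∀ (s : String), Dom_collapse_polymer s → Spec_collapse_polymer s (collapse_polymer s)

-- ===== LEMMAS AND PROOFS =====

theorem react_symm (x y : Char) : react x y = react y x := by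
  simp only [react]
  rcases eq_or_ne x y with h2 | h2
  · subst h2; rfl
  · rw [bne_iff_ne.mpr h2, bne_iff_ne.mpr h2.symm, Bool.and_true, Bool.and_true]
    rcases eq_or_ne (PySem.Chars.lowerChar x) (PySem.Chars.lowerChar y) with h1 | h1
    · rw [h1]
    · rw [beq_eq_false_iff_ne.mpr h1, beq_eq_false_iff_ne.mpr h1.symm]

theorem char_le_toNat {a b : Char} : a ≤ b ↔ a.toNat ≤ b.toNat := by
  rw [Char.le_def]
  exact UInt32.le_iff_toNat_le

theorem lower_toNat (c : Char) :
    (PySem.Chars.lowerChar c).toNat =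
      if 65 ≤ c.toNat ∧ c.toNat ≤ 90 then c.toNat + 32 else c.toNat := by
  simp only [PySem.Chars.lowerChar, PySem.Chars.isupper, Bool.and_eq_true, decide_eq_true_eq,
    char_le_toNat]
  have hA : ('A' : Char).toNat = 65 := rfl
  have hZ : ('Z' : Char).toNat = 90 := rfl
  rw [hA, hZ]
  by_cases h : 65 ≤ c.toNat ∧ c.toNat ≤ 90
  · rw [if_pos h, if_pos h, Char.toNat_ofNat, if_pos]
    exact Or.inl (by omega)
  · rw [if_neg h, if_neg h]

theorem toNat_inj' {a b : Char} (h : a.toNat = b.toNat) : a = b :=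
  Char.ext (UInt32.toNat_inj.mp h)

-- a character has at most one reacting partner
theorem react_right_unique {x y h : Char} (hy : react x y = true) (hh : react x h = true) :
    y = h := by
  simp only [react, Bool.and_eq_true, beq_iff_eq, bne_iff_ne, ne_eq] at hy hh
  obtain ⟨hy1, hy2⟩ := hy
  obtain ⟨hh1, hh2⟩ := hh
  apply toNat_inj'
  have e1 := congrArg Char.toNat hy1
  have e2 := congrArg Char.toNat hh1
  rw [lower_toNat, lower_toNat] at e1 e2
  have nxy : x.toNat ≠ y.toNat := fun q => hy2 (toNat_inj' q)
  have nxh : x.toNat ≠ h.toNat := fun q => hh2 (toNat_inj' q)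
  split_ifs at e1 e2 <;> omega

-- no two adjacent characters react
def Reduced (l : List Char) : Prop := List.IsChain (fun a b => react a b = false) l

theorem redStep_reduced {t : List Char} (ht : Reduced t) (u : Char) :
    Reduced (redStep t u) := by
  match t with
  | [] => exact List.isChain_singleton u
  | h :: t' =>
      simp only [redStep]
      split
      · exact ht.tail
      · next hne =>
          exact List.isChain_cons_cons.mpr ⟨Bool.not_eq_true _ ▸ hne, ht⟩

-- core cancellation: pushing a reacting pair onto a reduced stack is a no-op
theorem redStep_cancel {t : List Char} (ht : Reduced t) {x y : Char} (hxy : react x y = true) :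
    redStep (redStep t x) y = t := by
  match t with
  | [] =>
      simp only [redStep]
      rw [if_pos (react_symm y x ▸ hxy)]
  | h :: t' =>
      by_cases hxh : react x h = true
      · have hyh : y = h := react_right_unique hxy hxh
        subst hyh
        simp only [redStep, if_pos hxh]
        match t' with
        | [] => rfl
        | h2 :: t2 =>
            have : react y h2 = false := List.isChain_cons_cons.mp ht |>.1
            simp [this]
      · simp only [redStep, if_neg hxh]
        rw [if_pos (react_symm y x ▸ hxy)]

theorem foldl_redStep_reduced (l : List Char) {t : List Char} (ht : Reduced t) :
    Reduced (List.foldl redStep t l) := by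
  induction l generalizing t with
  | nil => exact ht
  | cons a l ih => exact ih (redStep_reduced ht a)

-- one removal of a reacting adjacent pair
def Rem (s t : List Char) : Prop :=
  ∃ u x y v, react x y = true ∧ s = u ++ x :: y :: v ∧ t = u ++ v

theorem rem_fold {s t : List Char} (h : Rem s t) {acc : List Char} (hacc : Reduced acc) :
    List.foldl redStep acc s = List.foldl redStep acc t := by
  obtain ⟨u, x, y, v, hxy, hs, ht⟩ := h
  subst hs ht
  simp only [List.foldl_append, List.foldl_cons]
  rw [redStep_cancel (foldl_redStep_reduced u hacc) hxy]

theorem remStar_fold {s t : List Char} (h : Relation.ReflTransGen Rem s t) :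
    List.foldl redStep [] s = List.foldl redStep [] t := by
  induction h with
  | refl => rfl
  | tail _ hbc ih => exact ih.trans (rem_fold hbc List.isChain_nil)

theorem rem_cons {s t : List Char} (c : Char) (h : Rem s t) : Rem (c :: s) (c :: t) := by
  obtain ⟨u, x, y, v, hxy, hs, ht⟩ := h
  exact ⟨c :: u, x, y, v, hxy, by simp [hs], by simp [ht]⟩

theorem rem_reverse {s t : List Char} (h : Rem s t) : Rem s.reverse t.reverse := by
  obtain ⟨u, x, y, v, hxy, hs, ht⟩ := h
  refine ⟨v.reverse, y, x, u.reverse, react_symm x y ▸ hxy, ?_, ?_⟩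
  · subst hs; simp
  · subst ht; simp

theorem pass1_rtg (l : List Char) : Relation.ReflTransGen Rem l (pass1 l) := by
  induction l using pass1.induct with
  | case1 => simpa [pass1] using Relation.ReflTransGen.refl
  | case2 x => simpa [pass1] using Relation.ReflTransGen.refl
  | case3 x y r h ih =>
      simp only [pass1, h, if_pos]
      exact Relation.ReflTransGen.head ⟨[], x, y, r, h, rfl, rfl⟩ ih
  | case4 x y r h ih =>
      simp only [pass1, h]
      simpa using Relation.ReflTransGen.lift (x :: ·) (fun _ _ => rem_cons x) ih

theorem pass1_eq_of_length {l : List Char} (h : (pass1 l).length = l.length) :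
    pass1 l = l := by
  induction l using pass1.induct with
  | case1 => rfl
  | case2 x => rfl
  | case3 x y r hr ih =>
      exfalso
      have := pass1_length_le r
      simp [pass1, hr] at h
      omega
  | case4 x y r hr ih =>
      have hp : pass1 (x :: y :: r) = x :: pass1 (y :: r) := by simp [pass1, hr]
      rw [hp] at h ⊢
      rw [ih (by simpa using h)]

theorem reduced_of_fix {l : List Char} (h : pass1 l = l) : Reduced l := by
  induction l using pass1.induct with
  | case1 => exact List.isChain_nil
  | case2 x => exact List.isChain_singleton x
  | case3 x y r hr ih =>
      exfalso
      have hlen := congrArg List.length h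
      have := pass1_length_le r
      simp [pass1, hr] at hlen
      omega
  | case4 x y r hr ih =>
      have hp : pass1 (x :: y :: r) = x :: pass1 (y :: r) := by simp [pass1, hr]
      rw [hp, List.cons.injEq] at h
      exact List.isChain_cons_cons.mpr ⟨Bool.not_eq_true _ ▸ hr, ih h.2⟩

theorem reduced_reverse {l : List Char} (h : Reduced l) : Reduced l.reverse := by
  unfold Reduced at *
  rw [List.isChain_reverse]
  exact h.imp fun {a b} hab => react_symm b a ▸ hab

-- folding a fully reduced list just reverses it onto the stack
theorem foldl_noreact : ∀ (l t : List Char), Reduced l →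
    (∀ a h, l.head? = some a → t.head? = some h → react a h = false) →
    List.foldl redStep t l = l.reverse ++ t := by
  intro l
  induction l with
  | nil => intro t _ _; simp
  | cons a l ih =>
      intro t hred hht
      have hstep : redStep t a = a :: t := by
        cases t with
        | nil => rfl
        | cons h t' =>
            have := hht a h rfl rfl
            simp [redStep, this]
      rw [List.foldl_cons, hstep]
      have hred' : Reduced l := hred.tail
      have hcond : ∀ b h, l.head? = some b → (a :: t).head? = some h → react b h = false := by
        intro b h hb hh
        simp only [List.head?_cons, Option.some.injEq] at hh
        subst hh
        exact react_symm b a ▸ (List.isChain_cons.mp hred).1 b (Option.mem_def.mpr hb)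
      rw [ih (a :: t) hred' hcond]
      simp

theorem iterFix_fix (l : List Char) : pass1 (iterFix l) = iterFix l := by
  induction l using iterFix.induct with
  | case1 l h => rw [iterFix, if_pos h]; exact pass1_eq_of_length h
  | case2 l h ih => rw [iterFix, if_neg h]; exact ih

theorem iterFix_fold (l : List Char) :
    List.foldl redStep [] (iterFix l).reverse = List.foldl redStep [] l.reverse := by
  induction l using iterFix.induct with
  | case1 l h => rw [iterFix, if_pos h]
  | case2 l h ih =>
      rw [iterFix, if_neg h, ih]
      have : Relation.ReflTransGen Rem l.reverse (pass1 l).reverse :=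
        Relation.ReflTransGen.lift List.reverse (fun _ _ => rem_reverse) (pass1_rtg l)
      exact (remStar_fold this).symm

-- ===== VERDICT (by name: the statement is the Claim_ definition above) =====
theorem collapse_polymer_spec : Claim_equal_collapse_polymer := by
  intro s _
  unfold Spec_collapse_polymer collapse_polymer collapse_polymer_alt
  have hred : Reduced (iterFix s.toList).reverse :=
    reduced_reverse (reduced_of_fix (iterFix_fix s.toList))
  have h2 := foldl_noreact (iterFix s.toList).reverse [] hred
    (by intro a h _ hh; simp at hh)
  have h1 := iterFix_fold s.toList
  rw [← h1, h2]
  simp
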